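-- pv_equiv track=rewrite | github.com/mopben/class-scheduling | app_fixed.py | expand_days
-- ===== SOURCE A (Python) =====
-- def expand_days(day_string):
--     """Convert day abbreviations to full day names"""
--     day_map = {
--         'M': 'Monday',
--         'Tu': 'Tuesday',
--         'W': 'Wednesday',
--         'Th': 'Thursday',
--         'F': 'Friday',
--         'Sa': 'Saturday',
--         'Su': 'Sunday'
--     }
--
--     if not day_string:
--         return 'TBA'
--
--     # Handle common patterns
--     day_string = str(day_string).strip()
--
--     # Replace common abbreviations
--     if 'MWF' in day_string:
--         return 'Monday, Wednesday, Friday'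
--     elif 'TuTh' in day_string or 'TTh' in day_string:
--         return 'Tuesday, Thursday'
--     elif 'MW' in day_string:
--         return 'Monday, Wednesday'
--     elif 'WF' in day_string:
--         return 'Wednesday, Friday'
--
--     # Handle individual days or other patterns
--     result = []
--     i = 0
--     while i < len(day_string):
--         if i < len(day_string) - 1 and day_string[i:i+2] in day_map:
--             result.append(day_map[day_string[i:i+2]])
--             i += 2
--         elif day_string[i] in day_map:
--             result.append(day_map[day_string[i]])
--             i += 1
--         else:
--             i += 1
--
--     return ', '.join(result) if result else day_string
-- ===== SOURCE B (Python) =====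
-- import re
--
-- def expand_days(day_string):
--     """Convert day abbreviations to full day names (regex-tokenizer re-implementation)"""
--     if not day_string:
--         return 'TBA'
--
--     day_string = str(day_string).strip()
--
--     # Keep the special-case overrides of the original.
--     if 'MWF' in day_string:
--         return 'Monday, Wednesday, Friday'
--     elif 'TuTh' in day_string or 'TTh' in day_string:
--         return 'Tuesday, Thursday'
--     elif 'MW' in day_string:
--         return 'Monday, Wednesday'
--     elif 'WF' in day_string:
--         return 'Wednesday, Friday'
--
--     day_map = {
--         'M': 'Monday',
--         'Tu': 'Tuesday',
--         'W': 'Wednesday',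
--         'Th': 'Thursday',
--         'F': 'Friday',
--         'Sa': 'Saturday',
--         'Su': 'Sunday'
--     }
--
--     # Greedy left-to-right tokenization: two-char abbreviations first; unmatched
--     # characters are simply skipped (no single-char key is a prefix of a two-char key).
--     tokens = re.findall(r'Tu|Th|Sa|Su|M|W|F', day_string)
--     result = [day_map[t] for t in tokens]
--     return ', '.join(result) if result else day_string
-- ===== Notes on version B (the rewrite author's own statement) =====
-- stated objective: faster
-- what changed: The hand-written index/while scanner with slice lookups into the dict is replaced by a regex tokenizer (re.findall with two-char alternatives before one-char ones) followed by a map over the day table; the special-case chain is kept verbatim.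
import Mathlib
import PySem

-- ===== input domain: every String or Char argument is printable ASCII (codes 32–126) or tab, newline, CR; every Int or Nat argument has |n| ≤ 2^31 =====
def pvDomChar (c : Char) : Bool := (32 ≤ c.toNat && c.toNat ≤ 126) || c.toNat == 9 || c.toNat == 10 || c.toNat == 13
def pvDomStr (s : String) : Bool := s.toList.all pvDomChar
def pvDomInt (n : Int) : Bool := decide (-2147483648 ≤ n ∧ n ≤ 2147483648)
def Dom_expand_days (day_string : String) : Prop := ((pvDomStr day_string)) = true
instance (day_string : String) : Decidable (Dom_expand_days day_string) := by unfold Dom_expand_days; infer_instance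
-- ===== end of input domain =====

-- B replaces A's hand-written index/while scanner by a regex-style tokenizer followed by a
-- table lookup map (objective: more idiomatic); the special-case chain is kept verbatim.

-- ===== PORT A =====
def dayMapA : PySem.Dict String String := PySem.Dict.ofList
  [("M","Monday"),("Tu","Tuesday"),("W","Wednesday"),("Th","Thursday"),("F","Friday"),("Sa","Saturday"),("Su","Sunday")]

-- A's while-loop; the string is scanned by index, slices/indexing ported over the char list
-- (PySem.List.slice / pyGet? are exact for s[i:i+2] / s[i]).  The dict lookups day_map[...]
-- occur only after an 'in day_map' test succeeded, so '.getD ""' is never the KeyError path.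
def loopA (cs : List Char) (i : Nat) (acc : List String) : List String :=
  if i < cs.length then
    if decide (i < cs.length - 1) &&
        dayMapA.contains (String.ofList (PySem.List.slice cs (some (i:Int)) (some ((i:Int)+2)))) then
      loopA cs (i+2) (acc ++ [(dayMapA.get? (String.ofList (PySem.List.slice cs (some (i:Int)) (some ((i:Int)+2))))).getD ""])
    else if (match PySem.List.pyGet? cs (i:Int) with
             | some c => dayMapA.contains (String.ofList [c])
             | none => false) then
      loopA cs (i+1) (acc ++ [(dayMapA.get? (String.ofList [(PySem.List.pyGet? cs (i:Int)).getD ' '])).getD ""])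
    else
      loopA cs (i+1) acc
  else acc
  termination_by cs.length - i
  decreasing_by all_goals omega

def expand_days (day_string : String) : String :=
  if day_string = "" then "TBA"
  else
    let s := PySem.Str.strip day_string
    if PySem.Str.isIn "MWF" s then "Monday, Wednesday, Friday"
    else if PySem.Str.isIn "TuTh" s || PySem.Str.isIn "TTh" s then "Tuesday, Thursday"
    else if PySem.Str.isIn "MW" s then "Monday, Wednesday"
    else if PySem.Str.isIn "WF" s then "Wednesday, Friday"
    else
      let result := loopA s.toList 0 []
      if result ≠ [] then PySem.Str.join ", " result else s

-- ===== PORT B =====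
def dayMapB : PySem.Dict String String := PySem.Dict.ofList
  [("M","Monday"),("Tu","Tuesday"),("W","Wednesday"),("Th","Thursday"),("F","Friday"),("Sa","Saturday"),("Su","Sunday")]

-- Hand port of re.findall(r'Tu|Th|Sa|Su|M|W|F', s): exact — re.findall scans left to right,
-- at each position tries the alternatives in the written order, emits the first match and
-- resumes right after it, and advances one character when nothing matches.
def findTokens : List Char → List String
  | [] => []
  | c :: rest =>
    if c = 'T' ∧ rest.head? = some 'u' then "Tu" :: findTokens rest.tail
    else if c = 'T' ∧ rest.head? = some 'h' then "Th" :: findTokens rest.tail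
    else if c = 'S' ∧ rest.head? = some 'a' then "Sa" :: findTokens rest.tail
    else if c = 'S' ∧ rest.head? = some 'u' then "Su" :: findTokens rest.tail
    else if c = 'M' then "M" :: findTokens rest
    else if c = 'W' then "W" :: findTokens rest
    else if c = 'F' then "F" :: findTokens rest
    else findTokens rest
  termination_by l => l.length
  decreasing_by all_goals simp [List.length_tail]

def expand_days_alt (day_string : String) : String :=
  if day_string = "" then "TBA"
  else
    let s := PySem.Str.strip day_string
    if PySem.Str.isIn "MWF" s then "Monday, Wednesday, Friday"
    else if PySem.Str.isIn "TuTh" s || PySem.Str.isIn "TTh" s then "Tuesday, Thursday"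
    else if PySem.Str.isIn "MW" s then "Monday, Wednesday"
    else if PySem.Str.isIn "WF" s then "Wednesday, Friday"
    else
      let tokens := findTokens s.toList
      -- day_map[t]: every emitted token is a key of day_map, so '.getD ""' never fires
      let result := tokens.map (fun t => (dayMapB.get? t).getD "")
      if result ≠ [] then PySem.Str.join ", " result else s

-- ===== PRECONDITION & SPEC =====
def Spec_expand_days (day_string : String) (out : String) : Prop := out = expand_days_alt day_string
instance (day_string : String) (out : String) : Decidable (Spec_expand_days day_string out) := by unfold Spec_expand_days; infer_instance

-- ===== CLAIM (what is proved, stated in full; the proofs are below) =====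
def Claim_equal_expand_days : Prop := ∀ (day_string : String), Dom_expand_days day_string → Spec_expand_days day_string (expand_days day_string)

-- ===== LEMMAS AND PROOFS =====

lemma itemsA : dayMapA.items =
    [("M","Monday"),("Tu","Tuesday"),("W","Wednesday"),("Th","Thursday"),("F","Friday"),("Sa","Saturday"),("Su","Sunday")] := by
  decide

lemma c2_cases (c1 c2 : Char) (h : dayMapA.contains (String.ofList [c1,c2]) = true) :
    (c1 = 'T' ∧ c2 = 'u') ∨ (c1 = 'T' ∧ c2 = 'h') ∨ (c1 = 'S' ∧ c2 = 'a') ∨ (c1 = 'S' ∧ c2 = 'u') := by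
  simp only [PySem.Dict.contains, itemsA, List.any_cons, List.any_nil, Bool.or_eq_true,
    beq_iff_eq, Bool.false_eq_true, or_false] at h
  rcases h with h|h|h|h|h|h|h <;> apply_fun String.toList at h <;>
    simp [show ("M":String).toList = ['M'] from rfl, show ("Tu":String).toList = ['T','u'] from rfl,
      show ("W":String).toList = ['W'] from rfl, show ("Th":String).toList = ['T','h'] from rfl,
      show ("F":String).toList = ['F'] from rfl, show ("Sa":String).toList = ['S','a'] from rfl,
      show ("Su":String).toList = ['S','u'] from rfl] at h <;> tauto

lemma c1_cases (c : Char) (h : dayMapA.contains (String.ofList [c]) = true) :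
    c = 'M' ∨ c = 'W' ∨ c = 'F' := by
  simp only [PySem.Dict.contains, itemsA, List.any_cons, List.any_nil, Bool.or_eq_true,
    beq_iff_eq, Bool.false_eq_true, or_false] at h
  rcases h with h|h|h|h|h|h|h <;> apply_fun String.toList at h <;>
    simp [show ("M":String).toList = ['M'] from rfl, show ("Tu":String).toList = ['T','u'] from rfl,
      show ("W":String).toList = ['W'] from rfl, show ("Th":String).toList = ['T','h'] from rfl,
      show ("F":String).toList = ['F'] from rfl, show ("Sa":String).toList = ['S','a'] from rfl,
      show ("Su":String).toList = ['S','u'] from rfl] at h <;> tauto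

lemma slice_two (cs : List Char) (i : Nat) :
    PySem.List.slice cs (some (i:Int)) (some ((i:Int)+2)) = (cs.drop i).take 2 := by
  have h := PySem.List.slice_natCast_add cs i 2
  push_cast at h
  exact h

lemma ft_Tu (r : List Char) : findTokens ('T'::'u'::r) = "Tu" :: findTokens r := by
  rw [findTokens]; simp

lemma ft_Th (r : List Char) : findTokens ('T'::'h'::r) = "Th" :: findTokens r := by
  rw [findTokens]; simp

lemma ft_Sa (r : List Char) : findTokens ('S'::'a'::r) = "Sa" :: findTokens r := by
  rw [findTokens]; simp

lemma ft_Su (r : List Char) : findTokens ('S'::'u'::r) = "Su" :: findTokens r := by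
  rw [findTokens]; simp

lemma ft_M (r : List Char) : findTokens ('M'::r) = "M" :: findTokens r := by
  rw [findTokens]
  simp [show ¬(('M':Char) = 'T') from by decide, show ¬(('M':Char) = 'S') from by decide]

lemma ft_W (r : List Char) : findTokens ('W'::r) = "W" :: findTokens r := by
  rw [findTokens]
  simp [show ¬(('W':Char) = 'T') from by decide, show ¬(('W':Char) = 'S') from by decide,
    show ¬(('W':Char) = 'M') from by decide]

lemma ft_F (r : List Char) : findTokens ('F'::r) = "F" :: findTokens r := by
  rw [findTokens]
  simp [show ¬(('F':Char) = 'T') from by decide, show ¬(('F':Char) = 'S') from by decide,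
    show ¬(('F':Char) = 'M') from by decide, show ¬(('F':Char) = 'W') from by decide]

lemma ft_skip (c : Char) (r : List Char)
    (hTu : ¬(c = 'T' ∧ r.head? = some 'u')) (hTh : ¬(c = 'T' ∧ r.head? = some 'h'))
    (hSa : ¬(c = 'S' ∧ r.head? = some 'a')) (hSu : ¬(c = 'S' ∧ r.head? = some 'u'))
    (hM : ¬ c = 'M') (hW : ¬ c = 'W') (hF : ¬ c = 'F') :
    findTokens (c::r) = findTokens r := by
  rw [findTokens]; simp [hTu, hTh, hSa, hSu, hM, hW, hF]

lemma vTu : (dayMapA.get? (String.ofList ['T','u'])).getD "" = "Tuesday" := by decide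
lemma vTh : (dayMapA.get? (String.ofList ['T','h'])).getD "" = "Thursday" := by decide
lemma vSa : (dayMapA.get? (String.ofList ['S','a'])).getD "" = "Saturday" := by decide
lemma vSu : (dayMapA.get? (String.ofList ['S','u'])).getD "" = "Sunday" := by decide
lemma vM : (dayMapA.get? (String.ofList ['M'])).getD "" = "Monday" := by decide
lemma vW : (dayMapA.get? (String.ofList ['W'])).getD "" = "Wednesday" := by decide
lemma vF : (dayMapA.get? (String.ofList ['F'])).getD "" = "Friday" := by decide
lemma fTu : (dayMapB.get? "Tu").getD "" = "Tuesday" := by decide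
lemma fTh : (dayMapB.get? "Th").getD "" = "Thursday" := by decide
lemma fSa : (dayMapB.get? "Sa").getD "" = "Saturday" := by decide
lemma fSu : (dayMapB.get? "Su").getD "" = "Sunday" := by decide
lemma fM : (dayMapB.get? "M").getD "" = "Monday" := by decide
lemma fW : (dayMapB.get? "W").getD "" = "Wednesday" := by decide
lemma fF : (dayMapB.get? "F").getD "" = "Friday" := by decide

lemma loopA_eq (cs : List Char) : ∀ (n i : Nat) (acc : List String), cs.length ≤ i + n →
    loopA cs i acc = acc ++ (findTokens (cs.drop i)).map (fun t => (dayMapB.get? t).getD "") := by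
  intro n
  induction n with
  | zero =>
    intro i acc hb
    rw [loopA, List.drop_eq_nil_of_le (by omega)]
    simp [findTokens, if_neg (by omega : ¬ i < cs.length)]
  | succ n ih =>
    intro i acc hb
    by_cases hi : i < cs.length
    · have hdrop : cs.drop i = cs[i] :: cs.drop (i+1) := List.drop_eq_getElem_cons hi
      have hget : PySem.List.pyGet? cs (i:Int) = some cs[i] := by
        rw [PySem.List.pyGet?_natCast, List.getElem?_eq_getElem hi]
      by_cases hi2 : i < cs.length - 1
      · have hdrop2 : cs.drop (i+1) = cs[i+1] :: cs.drop (i+2) := List.drop_eq_getElem_cons (by omega)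
        have hsl : PySem.List.slice cs (some (i:Int)) (some ((i:Int)+2)) = [cs[i], cs[i+1]] := by
          rw [slice_two, hdrop, hdrop2]; rfl
        by_cases hc2 : dayMapA.contains (String.ofList [cs[i], cs[i+1]]) = true
        · have hcond : (decide (i < cs.length - 1) &&
              dayMapA.contains (String.ofList (PySem.List.slice cs (some (i:Int)) (some ((i:Int)+2))))) = true := by
            rw [hsl]; simp [hi2, hc2]
          rcases c2_cases _ _ hc2 with ⟨h1,h2⟩|⟨h1,h2⟩|⟨h1,h2⟩|⟨h1,h2⟩ <;>
          · rw [loopA, if_pos hi, if_pos hcond, ih (i+2) _ (by omega), hsl, hdrop, hdrop2, h1, h2]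
            first
            | (rw [ft_Tu, vTu]; simp [fTu])
            | (rw [ft_Th, vTh]; simp [fTh])
            | (rw [ft_Sa, vSa]; simp [fSa])
            | (rw [ft_Su, vSu]; simp [fSu])
        · have hcond : ¬ ((decide (i < cs.length - 1) &&
              dayMapA.contains (String.ofList (PySem.List.slice cs (some (i:Int)) (some ((i:Int)+2))))) = true) := by
            rw [hsl]; simp [hc2]
          have n1 : ¬(cs[i] = 'T' ∧ (cs.drop (i+1)).head? = some 'u') := by
            rintro ⟨e1, e2⟩
            rw [hdrop2] at e2; simp only [List.head?_cons, Option.some.injEq] at e2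
            exact hc2 (by rw [e1, e2]; decide)
          have n2 : ¬(cs[i] = 'T' ∧ (cs.drop (i+1)).head? = some 'h') := by
            rintro ⟨e1, e2⟩
            rw [hdrop2] at e2; simp only [List.head?_cons, Option.some.injEq] at e2
            exact hc2 (by rw [e1, e2]; decide)
          have n3 : ¬(cs[i] = 'S' ∧ (cs.drop (i+1)).head? = some 'a') := by
            rintro ⟨e1, e2⟩
            rw [hdrop2] at e2; simp only [List.head?_cons, Option.some.injEq] at e2
            exact hc2 (by rw [e1, e2]; decide)
          have n4 : ¬(cs[i] = 'S' ∧ (cs.drop (i+1)).head? = some 'u') := by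
            rintro ⟨e1, e2⟩
            rw [hdrop2] at e2; simp only [List.head?_cons, Option.some.injEq] at e2
            exact hc2 (by rw [e1, e2]; decide)
          by_cases hc1 : dayMapA.contains (String.ofList [cs[i]]) = true
          · rcases c1_cases _ hc1 with h1|h1|h1 <;>
            · rw [loopA, if_pos hi, if_neg hcond, hget]
              dsimp only
              rw [if_pos hc1, ih (i+1) _ (by omega), hdrop]
              simp only [Option.getD_some]
              rw [h1]
              first
              | (rw [ft_M, vM]; simp [fM])
              | (rw [ft_W, vW]; simp [fW])
              | (rw [ft_F, vF]; simp [fF])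
          · have m1 : ¬ cs[i] = 'M' := fun e => hc1 (by rw [e]; decide)
            have m2 : ¬ cs[i] = 'W' := fun e => hc1 (by rw [e]; decide)
            have m3 : ¬ cs[i] = 'F' := fun e => hc1 (by rw [e]; decide)
            rw [loopA, if_pos hi, if_neg hcond, hget]
            dsimp only
            rw [if_neg hc1, ih (i+1) _ (by omega), hdrop, ft_skip _ _ n1 n2 n3 n4 m1 m2 m3]
      · -- last character: i = cs.length - 1
        have hdrop2 : cs.drop (i+1) = [] := List.drop_eq_nil_of_le (by omega)
        have hcond : ¬ ((decide (i < cs.length - 1) &&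
            dayMapA.contains (String.ofList (PySem.List.slice cs (some (i:Int)) (some ((i:Int)+2))))) = true) := by
          simp [hi2]
        have hh : (cs.drop (i+1)).head? = none := by rw [hdrop2]; rfl
        have n1 : ¬(cs[i] = 'T' ∧ (cs.drop (i+1)).head? = some 'u') := by
          rintro ⟨_, e2⟩; rw [hh] at e2; cases e2
        have n2 : ¬(cs[i] = 'T' ∧ (cs.drop (i+1)).head? = some 'h') := by
          rintro ⟨_, e2⟩; rw [hh] at e2; cases e2
        have n3 : ¬(cs[i] = 'S' ∧ (cs.drop (i+1)).head? = some 'a') := by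
          rintro ⟨_, e2⟩; rw [hh] at e2; cases e2
        have n4 : ¬(cs[i] = 'S' ∧ (cs.drop (i+1)).head? = some 'u') := by
          rintro ⟨_, e2⟩; rw [hh] at e2; cases e2
        by_cases hc1 : dayMapA.contains (String.ofList [cs[i]]) = true
        · rcases c1_cases _ hc1 with h1|h1|h1 <;>
          · rw [loopA, if_pos hi, if_neg hcond, hget]
            dsimp only
            rw [if_pos hc1, ih (i+1) _ (by omega), hdrop]
            simp only [Option.getD_some]
            rw [h1]
            first
            | (rw [ft_M, vM]; simp [fM])
            | (rw [ft_W, vW]; simp [fW])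
            | (rw [ft_F, vF]; simp [fF])
        · have m1 : ¬ cs[i] = 'M' := fun e => hc1 (by rw [e]; decide)
          have m2 : ¬ cs[i] = 'W' := fun e => hc1 (by rw [e]; decide)
          have m3 : ¬ cs[i] = 'F' := fun e => hc1 (by rw [e]; decide)
          rw [loopA, if_pos hi, if_neg hcond, hget]
          dsimp only
          rw [if_neg hc1, ih (i+1) _ (by omega), hdrop, ft_skip _ _ n1 n2 n3 n4 m1 m2 m3]
    · rw [loopA, if_neg hi, List.drop_eq_nil_of_le (by omega)]
      simp [findTokens]

-- ===== VERDICT (by name: the statement is the Claim_ definition above) =====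
theorem expand_days_spec : Claim_equal_expand_days := by
  intro s _
  unfold Spec_expand_days expand_days expand_days_alt
  have h := loopA_eq (PySem.Str.strip s).toList (PySem.Str.strip s).toList.length 0 [] (by omega)
  simp only [List.drop_zero, List.nil_append] at h
  simp only [h]
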